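-- pv_equiv track=rewrite | github.com/8Dionysus/aoa-skills | scripts/refresh_skill_from_manifest.py | replace_technique_dependencies
-- ===== SOURCE A (Python) =====
-- def replace_technique_dependencies(
--     frontmatter_lines: list[str], technique_ids: list[str]
-- ) -> list[str]:
--     start_index = None
--     end_index = len(frontmatter_lines)
--
--     for index, line in enumerate(frontmatter_lines):
--         if line.startswith("technique_dependencies:"):
--             start_index = index
--             for next_index in range(index + 1, len(frontmatter_lines)):
--                 next_line = frontmatter_lines[next_index]
--                 if next_line.startswith("  - "):
--                     continue
--                 end_index = next_index
--                 break
--             break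
--
--     if start_index is None:
--         raise ValueError("frontmatter is missing technique_dependencies")
--
--     replacement = ["technique_dependencies:"] + [
--         f"  - {technique_id}" for technique_id in technique_ids
--     ]
--     return frontmatter_lines[:start_index] + replacement + frontmatter_lines[end_index:]
-- ===== SOURCE B (Python) =====
-- def replace_technique_dependencies(
--     frontmatter_lines: list[str], technique_ids: list[str]
-- ) -> list[str]:
--     result = []
--     replaced = False
--     in_block = False
--     for line in frontmatter_lines:
--         if not replaced and line.startswith("technique_dependencies:"):
--             result.append("technique_dependencies:")
--             result.extend(f"  - {technique_id}" for technique_id in technique_ids)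
--             replaced = True
--             in_block = True
--         elif in_block and line.startswith("  - "):
--             continue
--         else:
--             in_block = False
--             result.append(line)
--     if not replaced:
--         raise ValueError("frontmatter is missing technique_dependencies")
--     return result
-- ===== Notes on version B (the rewrite author's own statement) =====
-- stated objective: alternative
-- what changed: Single streaming pass with latched 'replaced' and 'in_block' flags that emits the output list while scanning, instead of locating start/end indices with a nested scan and then concatenating three slices.
import Mathlib
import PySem

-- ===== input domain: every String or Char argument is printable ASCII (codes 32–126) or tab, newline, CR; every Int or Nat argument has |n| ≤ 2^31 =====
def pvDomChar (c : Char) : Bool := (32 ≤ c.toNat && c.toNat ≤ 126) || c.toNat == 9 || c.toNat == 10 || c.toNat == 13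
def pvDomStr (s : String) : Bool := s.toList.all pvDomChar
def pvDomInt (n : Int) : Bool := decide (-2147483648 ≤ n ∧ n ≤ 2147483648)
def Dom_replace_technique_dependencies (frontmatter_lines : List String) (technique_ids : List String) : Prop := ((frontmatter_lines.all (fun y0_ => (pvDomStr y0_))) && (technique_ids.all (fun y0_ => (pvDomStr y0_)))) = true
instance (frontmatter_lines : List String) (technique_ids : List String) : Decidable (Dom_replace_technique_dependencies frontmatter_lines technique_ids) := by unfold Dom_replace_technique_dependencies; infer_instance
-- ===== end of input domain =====

-- B replaces A's find-start/end-indices-then-slice structure by a single streaming pass with latched flags; objective: alternative decomposition, same cost.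
-- Pre_ excludes inputs with no line starting with "technique_dependencies:", on which Python A raises ValueError (B raises there too).


-- ===== PORT A =====
-- A's inner loop: for next_index in range(index+1, len): skip "  - " lines, first other line is end_index; else end_index = len.
def pvA_endScan (rest : List String) (j : Nat) (len : Nat) : Nat :=
  match rest with
  | [] => len
  | l :: restTail =>
      if PySem.Str.startswith l "  - " then pvA_endScan restTail (j + 1) len
      else j

-- A's outer loop: enumerate, break at the first line starting with the marker (returns its index).
def pvA_findStart (lines : List String) (i : Nat) : Option Nat :=
  match lines with
  | [] => none
  | l :: restTail =>
      if PySem.Str.startswith l "technique_dependencies:" then some i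
      else pvA_findStart restTail (i + 1)

def replace_technique_dependencies (frontmatter_lines : List String) (technique_ids : List String) : List String :=
  match pvA_findStart frontmatter_lines 0 with
  | none => []  -- Python raises ValueError here; excluded by Pre_
  | some start_index =>
      let end_index := pvA_endScan (frontmatter_lines.drop (start_index + 1)) (start_index + 1) frontmatter_lines.length
      let replacement := "technique_dependencies:" :: technique_ids.map (fun technique_id => "  - " ++ technique_id)
      frontmatter_lines.take start_index ++ replacement ++ frontmatter_lines.drop end_index

-- ===== PORT B =====
-- single pass with state (result, replaced, in_block)
def pvB_step (technique_ids : List String) (st : List String × Bool × Bool) (line : String) : List String × Bool × Bool :=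
  let res := st.1
  let replaced := st.2.1
  let in_block := st.2.2
  if !replaced && PySem.Str.startswith line "technique_dependencies:" then
    (res ++ "technique_dependencies:" :: technique_ids.map (fun technique_id => "  - " ++ technique_id), true, true)
  else if in_block && PySem.Str.startswith line "  - " then
    st
  else
    (res ++ [line], replaced, false)

def replace_technique_dependencies_alt (frontmatter_lines : List String) (technique_ids : List String) : List String :=
  let fin := frontmatter_lines.foldl (pvB_step technique_ids) ([], false, false)
  if fin.2.1 then fin.1 else []  -- Python raises ValueError when not replaced; excluded by Pre_

-- ===== PRECONDITION & SPEC =====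
-- Pre_ excludes exactly the inputs on which A raises ValueError: no line starts with "technique_dependencies:".
def Pre_replace_technique_dependencies (frontmatter_lines : List String) (technique_ids : List String) : Prop :=
  frontmatter_lines.any (fun l => PySem.Str.startswith l "technique_dependencies:") = true
instance (frontmatter_lines : List String) (technique_ids : List String) : Decidable (Pre_replace_technique_dependencies frontmatter_lines technique_ids) := by unfold Pre_replace_technique_dependencies; infer_instance

def pvWitness_replace_technique_dependencies : List String × List String :=
  (["title: x", "technique_dependencies:", "  - old", "tags:"], ["t1", "t2"])

def Spec_replace_technique_dependencies (frontmatter_lines : List String) (technique_ids : List String) (out : List String) : Prop := out = replace_technique_dependencies_alt frontmatter_lines technique_ids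
instance (frontmatter_lines : List String) (technique_ids : List String) (out : List String) : Decidable (Spec_replace_technique_dependencies frontmatter_lines technique_ids out) := by unfold Spec_replace_technique_dependencies; infer_instance

-- ===== CLAIM (what is proved, stated in full; the proofs are below) =====
def Claim_equal_replace_technique_dependencies : Prop := ∀ (frontmatter_lines : List String) (technique_ids : List String), Dom_replace_technique_dependencies frontmatter_lines technique_ids → Pre_replace_technique_dependencies frontmatter_lines technique_ids → Spec_replace_technique_dependencies frontmatter_lines technique_ids (replace_technique_dependencies frontmatter_lines technique_ids)

-- ===== LEMMAS AND PROOFS =====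

-- the replacement block both programs build
def pvRepl (technique_ids : List String) : List String :=
  "technique_dependencies:" :: technique_ids.map (fun technique_id => "  - " ++ technique_id)

-- A's end-index scan followed by drop is dropWhile on the tail
theorem pvA_endScan_drop (fls : List String) (j : Nat) :
    fls.drop (pvA_endScan (fls.drop j) j fls.length) =
      (fls.drop j).dropWhile (fun l => PySem.Str.startswith l "  - ") := by
  have main : ∀ k j, fls.length - j ≤ k →
      fls.drop (pvA_endScan (fls.drop j) j fls.length) =
        (fls.drop j).dropWhile (fun l => PySem.Str.startswith l "  - ") := by
    intro k
    induction k with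
    | zero =>
        intro j hj
        have h0 : fls.drop j = [] := List.drop_eq_nil_of_le (by omega)
        rw [h0]
        simp only [pvA_endScan, List.dropWhile_nil, List.drop_length]
    | succ k ih =>
        intro j hj
        cases h : fls.drop j with
        | nil =>
            simp only [pvA_endScan, List.dropWhile_nil, List.drop_length]
        | cons l rest =>
            have hlt : j < fls.length := by
              by_contra hge
              rw [List.drop_eq_nil_of_le (by omega)] at h
              cases h
            have hsucc : fls.drop (j + 1) = rest := by
              rw [← List.tail_drop, h, List.tail_cons]
            simp only [pvA_endScan, List.dropWhile_cons]
            by_cases hd : PySem.Str.startswith l "  - " = true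
            · rw [if_pos hd, if_pos hd]
              have := ih (j + 1) (by omega)
              rw [hsucc] at this
              exact this
            · rw [if_neg hd, if_neg hd]; exact h
  exact main (fls.length - j) j le_rfl

-- shifting the base index of A's endScan and its length bound shifts the result
theorem pvA_endScan_shift (xs : List String) :
    ∀ j n, pvA_endScan xs (j + 1) (n + 1) = pvA_endScan xs j n + 1 := by
  induction xs with
  | nil => intro j n; rfl
  | cons x xt ih =>
      intro j n
      simp only [pvA_endScan]
      by_cases hx : PySem.Str.startswith x "  - " = true
      · rw [if_pos hx, if_pos hx, ih]
      · rw [if_neg hx, if_neg hx]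

-- shifting the start index of A's outer scan
theorem pvA_findStart_shift (lines : List String) :
    ∀ i, pvA_findStart lines i = (pvA_findStart lines 0).map (· + i) := by
  induction lines with
  | nil => intro i; rfl
  | cons l rest ih =>
      intro i
      simp only [pvA_findStart]
      by_cases hp : PySem.Str.startswith l "technique_dependencies:" = true
      · rw [if_pos hp, if_pos hp]
        simp only [Option.map_some, Nat.zero_add]
      · rw [if_neg hp, if_neg hp, ih (i + 1), ih 1, Option.map_map]
        cases pvA_findStart rest 0 with
        | none => rfl
        | some s => simp only [Option.map_some, Function.comp_apply]; congr 1; omega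

-- A's outer scan succeeds exactly when some line carries the marker
theorem pvA_findStart_isSome (lines : List String) :
    (pvA_findStart lines 0).isSome
      = lines.any (fun l => PySem.Str.startswith l "technique_dependencies:") := by
  induction lines with
  | nil => rfl
  | cons l rest ih =>
      simp only [pvA_findStart, List.any_cons]
      by_cases hp : PySem.Str.startswith l "technique_dependencies:" = true
      · rw [if_pos hp, hp, Bool.true_or]; rfl
      · have hpf : PySem.Str.startswith l "technique_dependencies:" = false := by
          rwa [Bool.not_eq_true] at hp
        rw [if_neg hp, hpf, Bool.false_or, pvA_findStart_shift rest 1, Option.isSome_map, ih]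

-- B: once replaced and out of the block, every remaining line is appended verbatim
theorem pvB_after (tids : List String) (xs : List String) (res : List String) :
    xs.foldl (pvB_step tids) (res, true, false) = (res ++ xs, true, false) := by
  induction xs generalizing res with
  | nil => simp
  | cons l rest ih =>
      simp only [List.foldl_cons, pvB_step]
      rw [if_neg (by simp), if_neg (by simp), ih]
      simp

-- B: inside the block, "  - " lines are skipped: the result is res ++ dropWhile
theorem pvB_inblock (tids : List String) (xs : List String) (res : List String) :
    xs.foldl (pvB_step tids) (res, true, true) =
      (res ++ xs.dropWhile (fun l => PySem.Str.startswith l "  - "), true,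
        decide (xs.dropWhile (fun l => PySem.Str.startswith l "  - ") = [])) := by
  induction xs generalizing res with
  | nil => simp
  | cons l rest ih =>
      simp only [List.foldl_cons, pvB_step, List.dropWhile_cons]
      by_cases hd : PySem.Str.startswith l "  - " = true
      · rw [if_pos hd, if_neg (by simp), if_pos (by rw [Bool.true_and]; exact hd), ih]
      · rw [if_neg hd, if_neg (by simp), if_neg (by rw [Bool.true_and]; exact hd), pvB_after]
        simp

-- the common structural recursion both programs implement (proof-side reference)
def pvRef (tids : List String) : List String → List String
  | [] => []
  | l :: rest =>
      if PySem.Str.startswith l "technique_dependencies:" then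
        pvRepl tids ++ rest.dropWhile (fun x => PySem.Str.startswith x "  - ")
      else l :: pvRef tids rest

theorem pvA_eq_ref (fls tids : List String)
    (hpre : fls.any (fun l => PySem.Str.startswith l "technique_dependencies:") = true) :
    replace_technique_dependencies fls tids = pvRef tids fls := by
  induction fls with
  | nil => simp at hpre
  | cons l rest ih =>
      by_cases hp : PySem.Str.startswith l "technique_dependencies:" = true
      · unfold replace_technique_dependencies
        simp only [pvA_findStart]
        rw [if_pos hp]
        have hscan := pvA_endScan_drop (l :: rest) 1
        simp only [List.drop_succ_cons, List.drop_zero] at hscan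
        simp only [List.drop_succ_cons, List.drop_zero, hscan, List.take_zero, List.nil_append]
        simp only [pvRef]
        rw [if_pos hp]
        rfl
      · have hrest : rest.any (fun x => PySem.Str.startswith x "technique_dependencies:") = true := by
          simp only [List.any_cons] at hpre
          rw [Bool.not_eq_true] at hp
          rwa [hp, Bool.false_or] at hpre
        cases hfs : pvA_findStart rest 0 with
        | none =>
            exfalso
            have := pvA_findStart_isSome rest
            rw [hfs, hrest] at this
            cases this
        | some s =>
            unfold replace_technique_dependencies
            simp only [pvA_findStart]
            rw [if_neg hp, pvA_findStart_shift rest 1, hfs]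
            simp only [Option.map_some]
            unfold replace_technique_dependencies at ih
            have ihv := ih hrest
            rw [hfs] at ihv
            simp only [pvRef]
            rw [if_neg hp, ← ihv]
            have hl : (l :: rest).length = rest.length + 1 := by simp
            simp only [List.take_succ_cons, List.drop_succ_cons, hl, pvA_endScan_shift,
              List.cons_append]

theorem pvB_eq_ref (fls tids : List String)
    (hpre : fls.any (fun l => PySem.Str.startswith l "technique_dependencies:") = true) :
    replace_technique_dependencies_alt fls tids = pvRef tids fls := by
  unfold replace_technique_dependencies_alt
  suffices h : ∀ res : List String,
      fls.foldl (pvB_step tids) (res, false, false) = (res ++ pvRef tids fls, true, false) ∨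
      fls.foldl (pvB_step tids) (res, false, false) = (res ++ pvRef tids fls, true, true) by
    rcases h [] with h | h <;> rw [h] <;> simp
  induction fls with
  | nil => simp at hpre
  | cons l rest ih =>
      intro res
      simp only [List.foldl_cons, pvB_step]
      by_cases hp : PySem.Str.startswith l "technique_dependencies:" = true
      · rw [if_pos (by rw [Bool.not_false, Bool.true_and]; exact hp), pvB_inblock]
        simp only [pvRef]
        rw [if_pos hp]
        by_cases he : rest.dropWhile (fun x => PySem.Str.startswith x "  - ") = []
        · right; rw [he]; simp [pvRepl]
        · left; rw [decide_eq_false he]; simp [pvRepl]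
      · have hrest : rest.any (fun x => PySem.Str.startswith x "technique_dependencies:") = true := by
          simp only [List.any_cons] at hpre
          rw [Bool.not_eq_true] at hp
          rwa [hp, Bool.false_or] at hpre
        rw [if_neg (by rw [Bool.not_false, Bool.true_and]; exact hp), if_neg (by simp)]
        rcases ih hrest (res ++ [l]) with h | h <;> [left; right] <;>
          rw [h] <;> simp only [pvRef] <;> rw [if_neg hp] <;> simp

-- ===== VERDICT (by name: the statement is the Claim_ definition above) =====
theorem replace_technique_dependencies_spec : Claim_equal_replace_technique_dependencies := by
  intro fls tids _ hpre
  unfold Spec_replace_technique_dependencies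
  rw [pvA_eq_ref fls tids hpre, pvB_eq_ref fls tids hpre]
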